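-- pv_equiv track=rewrite | github.com/GudimArt/treemenu | core/apps/treemenu/templatetags/tree_menu_tags.py | open_parents
-- ===== SOURCE A (Python) =====
-- def open_parents(html_tags):
--     details_buffer = []
--     for i in range(0, len(html_tags)):
--         if html_tags[i] == "<details open>":
--             for i in details_buffer:
--                 html_tags[i] = "<details open>"
--             break
--         elif html_tags[i] == "<details>":
--             details_buffer.append(i)
--
--     return html_tags
-- ===== SOURCE B (Python) =====
-- def open_parents(html_tags):
--     try:
--         boundary = html_tags.index("<details open>")
--     except ValueError:
--         return html_tags
--     for i in range(boundary):
--         if html_tags[i] == "<details>":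
--             html_tags[i] = "<details open>"
--     return html_tags
-- ===== Notes on version B (the rewrite author's own statement) =====
-- stated objective: simpler
-- what changed: Replaces A's accumulate-buffer-of-indices-then-flush-on-break single scan with a two-phase decomposition: locate the first '<details open>' via list.index (no-op on ValueError), then rewrite '<details>' entries in the prefix before that boundary.
import Mathlib
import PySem

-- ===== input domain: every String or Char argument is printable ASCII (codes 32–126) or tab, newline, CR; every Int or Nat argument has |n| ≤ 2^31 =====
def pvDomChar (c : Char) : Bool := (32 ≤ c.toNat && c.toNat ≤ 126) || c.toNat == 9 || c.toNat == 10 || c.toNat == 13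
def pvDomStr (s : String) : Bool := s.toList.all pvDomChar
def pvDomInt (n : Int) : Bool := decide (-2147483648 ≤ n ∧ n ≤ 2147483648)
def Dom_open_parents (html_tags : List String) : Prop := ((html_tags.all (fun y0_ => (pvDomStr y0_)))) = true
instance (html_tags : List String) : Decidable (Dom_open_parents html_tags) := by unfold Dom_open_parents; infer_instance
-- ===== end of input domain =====

-- B replaces A's accumulate-then-flush scan by find-boundary-then-rewrite-prefix (simpler); both Pythons
-- mutate the argument list in place and return it, so the proved return-value equivalence covers the mutation too.

-- ===== PORT A =====
-- A's for-loop with its details_buffer accumulator and break; the break branch flushes the buffer.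
def openLoopA (xs : List String) (i : Nat) (buf : List Nat) : List String :=
  if h : i < xs.length then
    if xs[i] = "<details open>" then
      buf.foldl (fun acc j => acc.set j "<details open>") xs
    else if xs[i] = "<details>" then
      openLoopA xs (i + 1) (buf ++ [i])
    else
      openLoopA xs (i + 1) buf
  else xs
termination_by xs.length - i

def open_parents (html_tags : List String) : List String :=
  openLoopA html_tags 0 []

-- ===== PORT B =====
-- B's second phase: rewrite '<details>' entries at indices i < b (all valid in Python since b ≤ len).
def openLoopB (xs : List String) (i b : Nat) : List String :=
  if i < b then
    openLoopB (if xs[i]? = some "<details>" then xs.set i "<details open>" else xs) (i + 1) b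
  else xs
termination_by b - i

def open_parents_alt (html_tags : List String) : List String :=
  match PySem.List.index? html_tags "<details open>" with
  | none => html_tags
  | some b => openLoopB html_tags 0 b

-- ===== PRECONDITION & SPEC =====
def Spec_open_parents (html_tags : List String) (out : List String) : Prop := out = open_parents_alt html_tags
instance (html_tags : List String) (out : List String) : Decidable (Spec_open_parents html_tags out) := by unfold Spec_open_parents; infer_instance

-- ===== CLAIM (what is proved, stated in full; the proofs are below) =====
def Claim_equal_open_parents : Prop := ∀ (html_tags : List String), Dom_open_parents html_tags → Spec_open_parents html_tags (open_parents html_tags)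

-- ===== LEMMAS AND PROOFS =====

theorem getElem?_openLoopB (b : Nat) : ∀ (n i : Nat), b - i ≤ n → ∀ (xs : List String) (j : Nat),
    (openLoopB xs i b)[j]? =
      if i ≤ j ∧ j < b ∧ xs[j]? = some "<details>" then some "<details open>" else xs[j]? := by
  intro n
  induction n with
  | zero =>
      intro i hi xs j
      rw [openLoopB, if_neg (by omega), if_neg (by omega)]
  | succ n ih =>
      intro i hi xs j
      by_cases h : i < b
      · rw [openLoopB, if_pos h, ih (i + 1) (by omega)]
        by_cases hji : j = i
        · subst hji
          by_cases hd : xs[j]? = some "<details>"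
          · have hjl : j < xs.length := (List.getElem?_eq_some_iff.mp hd).choose
            have hno : ¬ (j + 1 ≤ j ∧ j < b ∧
                ((if xs[j]? = some "<details>" then xs.set j "<details open>" else xs)[j]?
                  = some "<details>")) := fun hc => absurd hc.1 (by omega)
            rw [if_neg hno, if_pos hd, List.getElem?_set, if_pos rfl, if_pos hjl,
              if_pos ⟨Nat.le_refl j, h, hd⟩]
          · simp [hd, h]
        · have hiff : (i + 1 ≤ j ∧ j < b ∧ xs[j]? = some "<details>") ↔
              (i ≤ j ∧ j < b ∧ xs[j]? = some "<details>") :=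
            ⟨fun hc => ⟨by omega, hc.2⟩, fun hc => ⟨by omega, hc.2⟩⟩
          by_cases hd : xs[i]? = some "<details>"
          · have hset : (xs.set i "<details open>")[j]? = xs[j]? := by
              rw [List.getElem?_set, if_neg (fun hh => hji hh.symm)]
            rw [if_pos hd, hset]
            simp only [hiff]
          · rw [if_neg hd]
            simp only [hiff]
      · rw [openLoopB, if_neg h, if_neg (by omega)]

theorem getElem?_foldl_set : ∀ (buf : List Nat) (xs : List String) (j : Nat),
    (buf.foldl (fun acc k => acc.set k "<details open>") xs)[j]? =
      if j ∈ buf ∧ j < xs.length then some "<details open>" else xs[j]? := by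
  intro buf
  induction buf with
  | nil => intro xs j; simp
  | cons k rest ih =>
      intro xs j
      simp only [List.foldl_cons, ih, List.length_set, List.getElem?_set, List.mem_cons]
      by_cases hk : j = k
      · subst hk
        by_cases hl : j < xs.length
        · simp [hl]
        · rw [List.getElem?_eq_none (show xs.length ≤ j by omega)]
          simp [hl]
      · simp [hk, Ne.symm hk]

theorem index?_eq_first (xs : List String) (i : Nat) (hi : i < xs.length)
    (ho : xs[i] = "<details open>")
    (hpre : ∀ j, j < i → xs[j]? ≠ some "<details open>") :
    PySem.List.index? xs "<details open>" = some i := by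
  have hmem : "<details open>" ∈ xs := ho ▸ xs.getElem_mem hi
  have hsome : (PySem.List.index? xs "<details open>").isSome :=
    (PySem.List.index?_isSome_iff xs _).mpr hmem
  obtain ⟨k, hk⟩ := Option.isSome_iff_exists.mp hsome
  obtain ⟨hkl, hkv, hkmin⟩ := PySem.List.getElem_of_index?_eq_some hk
  have : k = i := by
    rcases Nat.lt_trichotomy k i with hlt | heq | hgt
    · exact absurd (List.getElem?_eq_getElem hkl ▸ congrArg some hkv)
        (by simpa using hpre k hlt)
    · exact heq
    · exact absurd ho (hkmin i hgt)
  exact this ▸ hk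

theorem loopA_eq (xs : List String) : ∀ (n i : Nat), xs.length - i ≤ n →
    (∀ j, j < i → xs[j]? ≠ some "<details open>") →
    openLoopA xs i ((List.range i).filter (fun j => xs[j]? == some "<details>")) =
      open_parents_alt xs := by
  intro n
  induction n with
  | zero =>
      intro i hi hpre
      rw [openLoopA, dif_neg (by omega)]
      have hnone : PySem.List.index? xs "<details open>" = none := by
        rw [PySem.List.index?_eq_none_iff]
        intro hmem
        obtain ⟨k, hkl, hkv⟩ := List.mem_iff_getElem.mp hmem
        exact hpre k (by omega) (by rw [List.getElem?_eq_getElem hkl, hkv])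
      rw [open_parents_alt, hnone]
  | succ n ih =>
      intro i hi hpre
      by_cases h : i < xs.length
      · rw [openLoopA, dif_pos h]
        by_cases ho : xs[i] = "<details open>"
        · rw [if_pos ho]
          rw [open_parents_alt, index?_eq_first xs i h ho hpre]
          apply List.ext_getElem?
          intro j
          rw [getElem?_foldl_set, getElem?_openLoopB i (i - 0) 0 (by omega)]
          by_cases hc : j < i ∧ xs[j]? = some "<details>"
          · have hjl : j < xs.length := (List.getElem?_eq_some_iff.mp hc.2).choose
            rw [if_pos ⟨List.mem_filter.mpr
                ⟨List.mem_range.mpr hc.1, by simpa using hc.2⟩, hjl⟩,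
              if_pos ⟨Nat.zero_le j, hc.1, hc.2⟩]
          · rw [if_neg (fun hh => hc ⟨List.mem_range.mp (List.mem_filter.mp hh.1).1,
                by simpa using (List.mem_filter.mp hh.1).2⟩),
              if_neg (fun hh => hc ⟨hh.2.1, hh.2.2⟩)]
        · by_cases hdet : xs[i] = "<details>"
          · rw [if_neg ho, if_pos hdet]
            have hpre' : ∀ j, j < i + 1 → xs[j]? ≠ some "<details open>" := by
              intro j hj
              rcases Nat.lt_or_ge j i with hlt | hge
              · exact hpre j hlt
              · have : j = i := by omega
                subst this
                rw [List.getElem?_eq_getElem h, hdet]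
                decide
            have hbuf : (List.range i).filter (fun j => xs[j]? == some "<details>") ++ [i]
                = (List.range (i + 1)).filter (fun j => xs[j]? == some "<details>") := by
              rw [List.range_succ, List.filter_append]
              have hb : (xs[i] == "<details>") = true := beq_iff_eq.mpr hdet
              simp [List.filter, List.getElem?_eq_getElem h, hb]
            rw [hbuf]
            exact ih (i + 1) (by omega) hpre'
          · rw [if_neg ho, if_neg hdet]
            have hpre' : ∀ j, j < i + 1 → xs[j]? ≠ some "<details open>" := by
              intro j hj
              rcases Nat.lt_or_ge j i with hlt | hge
              · exact hpre j hlt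
              · have : j = i := by omega
                subst this
                rw [List.getElem?_eq_getElem h]
                exact fun hh => ho (by simpa using hh)
            have hbuf : (List.range i).filter (fun j => xs[j]? == some "<details>")
                = (List.range (i + 1)).filter (fun j => xs[j]? == some "<details>") := by
              rw [List.range_succ, List.filter_append]
              have hb : (xs[i] == "<details>") = false := beq_eq_false_iff_ne.mpr hdet
              simp [List.filter, List.getElem?_eq_getElem h, hb]
            rw [hbuf]
            exact ih (i + 1) (by omega) hpre'
      · exact ih i (by omega) hpre

-- ===== VERDICT (by name: the statement is the Claim_ definition above) =====
theorem open_parents_spec : Claim_equal_open_parents := by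
  intro xs _
  unfold Spec_open_parents open_parents
  have h := loopA_eq xs xs.length 0 (by omega) (by intro j hj; omega)
  simpa using h
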